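-- pv_equiv track=rewrite | github.com/Taraneh-trk/ComputerSimulation | assignment-2/A2(python code).py | can_form_exact_load
-- ===== SOURCE A (Python) =====
-- def can_form_exact_load(queue, target_weight):
--     """Determine if items in the queue can form an exact load of target_weight.
--     Returns (can_form, selected_indices)"""
--
--     items = [(i, item[1]) for i, item in enumerate(queue)]
--     n = len(items)
--
--     items.sort(key=lambda x: x[1], reverse=True)
--
--     def find_subset_sum(items, target, start_idx=0, current_sum=0, current_indices=None):
--         if current_indices is None:
--             current_indices = []
--
--         if current_sum == target:
--             return True, current_indices
--
--         if start_idx >= len(items) or current_sum > target: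
--             return False, []
--
--         include_result, include_indices = find_subset_sum(
--             items, target, start_idx + 1,
--             current_sum + items[start_idx][1],
--             current_indices + [items[start_idx][0]]
--         )
--
--         if include_result:
--             return True, include_indices
--
--         return find_subset_sum(items, target, start_idx + 1, current_sum, current_indices)
--
--     can_form, selected_indices = find_subset_sum(items, target_weight)
--
--     return can_form, selected_indices
-- ===== SOURCE B (Python) =====
-- def can_form_exact_load(queue, target_weight):
--     """Determine if items in the queue can form an exact load of target_weight.
--     Returns (can_form, selected_indices)"""
--     items = sorted(((i, item[1]) for i, item in enumerate(queue)),
--                    key=lambda x: x[1], reverse=True)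
--     n = len(items)
--     memo = {}
--
--     def solve(start, rem):
--         if rem == 0:
--             return True, []
--         if start >= n or rem < 0:
--             return False, []
--         key = (start, rem)
--         if key in memo:
--             return memo[key]
--         idx, w = items[start]
--         ok, tail = solve(start + 1, rem - w)
--         if ok:
--             res = (True, [idx] + tail)
--         else:
--             res = solve(start + 1, rem)
--         memo[key] = res
--         return res
--
--     return solve(0, target_weight)
-- ===== Notes on version B (the rewrite author's own statement) =====
-- stated objective: alternative
-- what changed: Replaces the plain include/exclude DFS with a dict-memoized recursion on (start_index, remaining_weight), so each visited state is solved once and reused instead of re-exploring its subtree.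
import Mathlib
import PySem

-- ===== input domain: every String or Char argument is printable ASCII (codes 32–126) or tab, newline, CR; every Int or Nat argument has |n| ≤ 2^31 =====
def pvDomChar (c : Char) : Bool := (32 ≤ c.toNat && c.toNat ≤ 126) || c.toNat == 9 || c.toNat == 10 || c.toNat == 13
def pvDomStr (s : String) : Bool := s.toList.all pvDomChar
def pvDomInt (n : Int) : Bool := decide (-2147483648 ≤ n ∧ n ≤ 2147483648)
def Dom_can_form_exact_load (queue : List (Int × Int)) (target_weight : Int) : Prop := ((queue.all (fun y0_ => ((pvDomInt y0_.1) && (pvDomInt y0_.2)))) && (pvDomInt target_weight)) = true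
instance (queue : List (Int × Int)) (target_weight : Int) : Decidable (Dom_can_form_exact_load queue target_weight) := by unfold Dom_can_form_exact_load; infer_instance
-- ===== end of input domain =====

-- B replaces A's plain exponential include/exclude DFS by a dict-memoized recursion on
-- (start index, remaining weight); same sort and include-first reconstruction, each state solved once.

-- ===== PORT A =====
-- find_subset_sum: start_idx is always a nonnegative index here, ported as Nat;
-- items[start_idx] is in range when reached (guard above), ported as getD.
def fssA (items : List (Int × Int)) (target : Int) (start : Nat) (cs : Int) (acc : List Int) :
    Bool × List Int :=
  if cs = target then (true, acc)
  else if _h : items.length ≤ start ∨ target < cs then (false, [])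
  else
    let p := items.getD start (0, 0)
    let r := fssA items target (start + 1) (cs + p.2) (acc ++ [p.1])
    if r.1 then r
    else fssA items target (start + 1) cs acc
termination_by items.length - start
decreasing_by all_goals omega

def can_form_exact_load (queue : List (Int × Int)) (target_weight : Int) : Bool × List Int :=
  let items := PySem.List.sorted
      ((PySem.List.enumerate queue).map (fun p => (p.1, p.2.2))) (fun x => x.2) true
  fssA items target_weight 0 0 []

-- ===== PORT B =====
-- solve: memoized on (start, rem); start is always a nonnegative index, ported as Nat.
def solveB (items : List (Int × Int)) (memo : PySem.Dict (Nat × Int) (Bool × List Int))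
    (start : Nat) (rem : Int) : (Bool × List Int) × PySem.Dict (Nat × Int) (Bool × List Int) :=
  if rem = 0 then ((true, []), memo)
  else if _h : items.length ≤ start ∨ rem < 0 then ((false, []), memo)
  else
    match memo.get? (start, rem) with
    | some v => (v, memo)
    | none =>
      let p := items.getD start (0, 0)
      let r1 := solveB items memo (start + 1) (rem - p.2)
      if r1.1.1 then
        let res := (true, p.1 :: r1.1.2)
        (res, r1.2.insert (start, rem) res)
      else
        let r2 := solveB items r1.2 (start + 1) rem
        (r2.1, r2.2.insert (start, rem) r2.1)
termination_by items.length - start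
decreasing_by all_goals omega

def can_form_exact_load_alt (queue : List (Int × Int)) (target_weight : Int) : Bool × List Int :=
  let items := PySem.List.sorted
      ((PySem.List.enumerate queue).map (fun p => (p.1, p.2.2))) (fun x => x.2) true
  (solveB items PySem.Dict.empty 0 target_weight).1

-- ===== PRECONDITION & SPEC =====
def Spec_can_form_exact_load (queue : List (Int × Int)) (target_weight : Int) (out : Bool × List Int) : Prop := out = can_form_exact_load_alt queue target_weight
instance (queue : List (Int × Int)) (target_weight : Int) (out : Bool × List Int) : Decidable (Spec_can_form_exact_load queue target_weight out) := by unfold Spec_can_form_exact_load; infer_instance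

-- ===== CLAIM (what is proved, stated in full; the proofs are below) =====
def Claim_equal_can_form_exact_load : Prop := ∀ (queue : List (Int × Int)) (target_weight : Int), Dom_can_form_exact_load queue target_weight → Spec_can_form_exact_load queue target_weight (can_form_exact_load queue target_weight)

-- ===== LEMMAS AND PROOFS =====

-- the memo-free value of B's recursion
def pureP (items : List (Int × Int)) (start : Nat) (rem : Int) : Bool × List Int :=
  if rem = 0 then (true, [])
  else if _h : items.length ≤ start ∨ rem < 0 then (false, [])
  else
    let p := items.getD start (0, 0)
    let r := pureP items (start + 1) (rem - p.2)
    if r.1 then (true, p.1 :: r.2)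
    else pureP items (start + 1) rem
termination_by items.length - start
decreasing_by all_goals omega

lemma pureP_false (items : List (Int × Int)) :
    ∀ k start rem, items.length - start ≤ k →
    (pureP items start rem).1 = false → (pureP items start rem).2 = [] := by
  intro k
  induction k with
  | zero =>
    intro start rem hk h
    rw [pureP] at h ⊢
    by_cases h0 : rem = 0
    · simp [h0] at h
    · have h1 : items.length ≤ start ∨ rem < 0 := by
        by_cases hl : items.length ≤ start
        · exact Or.inl hl
        · exact absurd (by omega : items.length ≤ start) hl
      simp [h0, h1]
  | succ k ih =>
    intro start rem hk h
    rw [pureP] at h ⊢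
    by_cases h0 : rem = 0
    · simp [h0] at h
    · by_cases h1 : items.length ≤ start ∨ rem < 0
      · simp [h0, h1]
      · simp only [if_neg h0, dif_neg h1, List.getD_eq_getElem?_getD] at h ⊢
        have hlt : items.length - (start + 1) ≤ k := by omega
        by_cases hr : (pureP items (start + 1) (rem - (items[start]?.getD (0, 0)).2)).1 = true
        · simp [hr] at h
        · simp only [Bool.not_eq_true] at hr
          simp only [hr, Bool.false_eq_true, if_false] at h ⊢
          exact ih (start + 1) rem hlt h

lemma fssA_eq_pure (items : List (Int × Int)) (target : Int) :
    ∀ k start rem acc, items.length - start ≤ k →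
      fssA items target start (target - rem) acc =
        ((pureP items start rem).1,
         if (pureP items start rem).1 then acc ++ (pureP items start rem).2 else []) := by
  intro k
  induction k with
  | zero =>
    intro start rem acc hk
    rw [fssA, pureP]
    by_cases h0 : rem = 0
    · simp [h0]
    · have hne : ¬ (target - rem = target) := by omega
      have h1 : items.length ≤ start ∨ rem < 0 := by
        by_cases hl : items.length ≤ start
        · exact Or.inl hl
        · exact absurd (by omega : items.length ≤ start) hl
      have h1' : items.length ≤ start ∨ target < target - rem := by
        rcases h1 with h | h
        · exact Or.inl h
        · exact Or.inr (by omega)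
      simp [hne, h0, h1, h1']
  | succ k ih =>
    intro start rem acc hk
    rw [fssA, pureP]
    by_cases h0 : rem = 0
    · simp [h0]
    · have hne : ¬ (target - rem = target) := by omega
      by_cases h1 : items.length ≤ start ∨ rem < 0
      · have h1' : items.length ≤ start ∨ target < target - rem := by
          rcases h1 with h | h
          · exact Or.inl h
          · exact Or.inr (by omega)
        simp [hne, h0, h1, h1']
      · have h1' : ¬ (items.length ≤ start ∨ target < target - rem) := by
          push Not at h1 ⊢
          exact ⟨h1.1, by omega⟩
        simp only [if_neg hne, dif_neg h1', if_neg h0, dif_neg h1,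
          List.getD_eq_getElem?_getD]
        have hlt : items.length - (start + 1) ≤ k := by omega
        have harg : target - rem + (items[start]?.getD (0, 0)).2
            = target - (rem - (items[start]?.getD (0, 0)).2) := by ring
        rw [harg, ih (start + 1) (rem - (items[start]?.getD (0, 0)).2) (acc ++ [(items[start]?.getD (0, 0)).1]) hlt]
        by_cases hr : (pureP items (start + 1) (rem - (items[start]?.getD (0, 0)).2)).1 = true
        · simp [hr]
        · simp only [Bool.not_eq_true] at hr
          simp only [hr, Bool.false_eq_true, if_false]
          exact ih (start + 1) rem acc hlt

def GoodMemo (items : List (Int × Int)) (memo : PySem.Dict (Nat × Int) (Bool × List Int)) : Prop :=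
  ∀ k v, memo.get? k = some v → v = pureP items k.1 k.2

lemma goodMemo_insert (items : List (Int × Int)) (memo : PySem.Dict (Nat × Int) (Bool × List Int))
    (start : Nat) (rem : Int) (res : Bool × List Int) (hg : GoodMemo items memo)
    (hres : res = pureP items start rem) :
    GoodMemo items (memo.insert (start, rem) res) := by
  intro k v hv
  rw [PySem.Dict.get?_insert] at hv
  by_cases hk : k = (start, rem)
  · simp [hk] at hv
    subst hv hk
    exact hres
  · rw [if_neg hk] at hv
    exact hg k v hv

lemma solveB_correct (items : List (Int × Int)) :
    ∀ k start rem memo, items.length - start ≤ k → GoodMemo items memo →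
      (solveB items memo start rem).1 = pureP items start rem ∧
        GoodMemo items (solveB items memo start rem).2 := by
  intro k
  induction k with
  | zero =>
    intro start rem memo hk hg
    rw [solveB, pureP]
    by_cases h0 : rem = 0
    · simp [h0, hg]
    · have h1 : items.length ≤ start ∨ rem < 0 := by
        by_cases hl : items.length ≤ start
        · exact Or.inl hl
        · exact absurd (by omega : items.length ≤ start) hl
      simp [h0, h1, hg]
  | succ k ih =>
    intro start rem memo hk hg
    rw [solveB]
    by_cases h0 : rem = 0
    · rw [pureP]; simp [h0, hg]
    · by_cases h1 : items.length ≤ start ∨ rem < 0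
      · rw [pureP]; simp [h0, h1, hg]
      · simp only [if_neg h0, dif_neg h1, List.getD_eq_getElem?_getD]
        cases hm : memo.get? (start, rem) with
        | some v =>
          simp only []
          exact ⟨(hg (start, rem) v hm).symm ▸ rfl, hg⟩
        | none =>
          simp only []
          have hlt : items.length - (start + 1) ≤ k := by omega
          obtain ⟨ih1, ihg1⟩ := ih (start + 1) (rem - (items[start]?.getD (0, 0)).2) memo hlt hg
          have hP : pureP items start rem =
              (if (pureP items (start + 1) (rem - (items[start]?.getD (0, 0)).2)).1 then
                (true, (items[start]?.getD (0, 0)).1 ::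
                  (pureP items (start + 1) (rem - (items[start]?.getD (0, 0)).2)).2)
              else pureP items (start + 1) rem) := by
            rw [pureP]
            simp only [if_neg h0, dif_neg h1, List.getD_eq_getElem?_getD]
          by_cases hr : (solveB items memo (start + 1) (rem - (items[start]?.getD (0, 0)).2)).1.1 = true
          · simp only [hr, if_true]
            have hres : (true, (items[start]?.getD (0, 0)).1 ::
                (solveB items memo (start + 1) (rem - (items[start]?.getD (0, 0)).2)).1.2)
                = pureP items start rem := by
              rw [ih1] at hr
              rw [ih1, hP]
              simp [hr]
            exact ⟨hres, goodMemo_insert items _ start rem _ ihg1 hres⟩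
          · simp only [Bool.not_eq_true] at hr
            simp only [hr, Bool.false_eq_true, if_false]
            obtain ⟨ih2, ihg2⟩ := ih (start + 1) rem _ hlt ihg1
            have hres : (solveB items
                (solveB items memo (start + 1) (rem - (items[start]?.getD (0, 0)).2)).2
                (start + 1) rem).1 = pureP items start rem := by
              rw [ih1] at hr
              rw [ih2, hP]
              simp [hr]
            exact ⟨hres, goodMemo_insert items _ start rem _ ihg2 hres⟩

-- ===== VERDICT (by name: the statement is the Claim_ definition above) =====
theorem can_form_exact_load_spec : Claim_equal_can_form_exact_load := by
  intro queue target _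
  unfold Spec_can_form_exact_load can_form_exact_load can_form_exact_load_alt
  set items := PySem.List.sorted
      ((PySem.List.enumerate queue).map (fun p => (p.1, p.2.2))) (fun x => x.2) true with hitems
  have hB := (solveB_correct items (items.length) 0 target PySem.Dict.empty (by omega)
      (by intro k v hv; simp [PySem.Dict.get?_empty] at hv)).1
  have hA := fssA_eq_pure items target (items.length) 0 target [] (by omega)
  simp only [sub_self] at hA
  rw [hA, hB]
  cases hb : (pureP items 0 target).1 with
  | false => simp [pureP_false items items.length 0 target (by omega) hb, Prod.ext_iff, hb]
  | true => simp [Prod.ext_iff, hb]
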